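-- pv_equiv track=rewrite | github.com/mingyueanyao/Cryptography | Codes/3DES.py | bit2hex
-- ===== SOURCE A (Python) =====
-- def bit2hex(in_bit):
--     unicode_number = []
--     tmp = 0
--     for i in range(len(in_bit)):
--         tmp = tmp | (in_bit[i] << (i % 8))
--         if i % 8 == 7:
--             unicode_number.append(tmp)
--             tmp = 0
--
--     out_str = ' '.join([hex(n) for n in unicode_number])
--     return out_str
-- ===== SOURCE B (Python) =====
-- def bit2hex(in_bit):
--     # Chunk-and-consume: slice out 8 bits at a time at an advancing pointer,
--     # build each byte Horner-style (MSB-first over the reversed chunk): v = (v << 1) | bit.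
--     parts = []
--     p = 0
--     while p + 8 <= len(in_bit):
--         chunk = in_bit[p:p + 8]
--         v = 0
--         for bit in reversed(chunk):
--             v = (v << 1) | bit
--         parts.append(hex(v))
--         p += 8
--     return ' '.join(parts)
-- ===== Notes on version B (the rewrite author's own statement) =====
-- stated objective: alternative
-- what changed: Replaces A's single indexed pass with an i%8 bit counter and a reset OR-accumulator by a chunk-and-consume loop that slices 8 bits off the front at a time and builds each byte Horner-style, v = (v << 1) | bit, over the reversed chunk.
import Mathlib
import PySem

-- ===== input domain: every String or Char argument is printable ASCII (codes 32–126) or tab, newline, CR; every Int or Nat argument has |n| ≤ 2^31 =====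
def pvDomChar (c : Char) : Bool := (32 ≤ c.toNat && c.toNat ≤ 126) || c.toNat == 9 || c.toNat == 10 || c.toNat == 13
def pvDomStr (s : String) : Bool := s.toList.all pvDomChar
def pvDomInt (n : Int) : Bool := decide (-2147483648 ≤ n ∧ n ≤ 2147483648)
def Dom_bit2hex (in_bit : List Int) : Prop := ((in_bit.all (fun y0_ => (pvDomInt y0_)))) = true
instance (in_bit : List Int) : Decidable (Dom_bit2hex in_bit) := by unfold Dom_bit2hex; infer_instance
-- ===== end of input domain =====

-- B replaces A's single indexed pass (modular bit counter, reset accumulator) by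
-- chunk-and-consume slicing with a Horner-style byte build v = (v<<1)|bit over the
-- reversed chunk; objective: alternative.


-- Python's hex(n): '0x' + lowercase hex digits, '-0x…' for negative n (exact for all Int)
def pyHex (n : Int) : String :=
  if n < 0 then "-0x" ++ String.ofList (Nat.toDigits 16 n.natAbs)
  else "0x" ++ String.ofList (Nat.toDigits 16 n.toNat)

-- ===== PORT A =====
-- A's for-loop over i in range(len(in_bit)), carrying (tmp, reversed unicode_number);
-- Python `x << (i % 8)` is `x * 2^(i % 8)` (exact: the shift amount is nonnegative).
def bit2hexLoopA : List Int → Nat → Int → List Int → List Int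
  | [], _, _, acc => acc.reverse
  | x :: rest, i, tmp, acc =>
    let tmp' := tmp.lor (x * 2 ^ (i % 8))
    if i % 8 = 7 then bit2hexLoopA rest (i + 1) 0 (tmp' :: acc)
    else bit2hexLoopA rest (i + 1) tmp' acc

def bit2hex (in_bit : List Int) : String :=
  PySem.Str.join " " ((bit2hexLoopA in_bit 0 0 []).map pyHex)

-- ===== PORT B =====
-- B's inner for-loop over reversed(chunk): v = (v << 1) | bit; `v << 1` is `v * 2`
-- (exact for every Int, including negatives).
def hornerByte (chunk : List Int) : Int :=
  chunk.reverse.foldl (fun v b => (v * 2).lor b) 0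

-- B's while-loop: advance a pointer p by 8 while p + 8 <= len, slicing bits[p:p+8].
def bit2hexLoopB (bits : List Int) (p : Nat) : List String :=
  if _h : p + 8 ≤ bits.length then
    pyHex (hornerByte (PySem.List.slice bits (some (p : Int)) (some ((p + 8 : Nat) : Int))))
      :: bit2hexLoopB bits (p + 8)
  else []
termination_by bits.length - p

def bit2hex_alt (in_bit : List Int) : String :=
  PySem.Str.join " " (bit2hexLoopB in_bit 0)

-- ===== PRECONDITION & SPEC =====
def Spec_bit2hex (in_bit : List Int) (out : String) : Prop := out = bit2hex_alt in_bit
instance (in_bit : List Int) (out : String) : Decidable (Spec_bit2hex in_bit out) := by unfold Spec_bit2hex; infer_instance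

-- ===== CLAIM (what is proved, stated in full; the proofs are below) =====
def Claim_equal_bit2hex : Prop := ∀ (in_bit : List Int), Dom_bit2hex in_bit → Spec_bit2hex in_bit (bit2hex in_bit)

-- ===== LEMMAS AND PROOFS =====

-- two's-complement extensionality for Int, and the lor algebra it yields
theorem intTestBitExt (a b : Int) (h : ∀ k, a.testBit k = b.testBit k) : a = b := by
  cases a with
  | ofNat m =>
    cases b with
    | ofNat n =>
      have := Nat.eq_of_testBit_eq (x := m) (y := n) (fun k => by simpa [Int.testBit] using h k)
      simp [this]
    | negSucc n =>
      obtain ⟨k, hk⟩ : ∃ k, m < 2^k ∧ n < 2^k := by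
        have h2 : m + n < 2 ^ (m + n) := Nat.lt_two_pow_self
        exact ⟨m + n, by omega, by omega⟩
      have := h k
      simp [Int.testBit, Nat.testBit_lt_two_pow hk.1, Nat.testBit_lt_two_pow hk.2] at this
  | negSucc m =>
    cases b with
    | ofNat n =>
      obtain ⟨k, hk⟩ : ∃ k, m < 2^k ∧ n < 2^k := by
        have h2 : m + n < 2 ^ (m + n) := Nat.lt_two_pow_self
        exact ⟨m + n, by omega, by omega⟩
      have := h k
      simp [Int.testBit, Nat.testBit_lt_two_pow hk.1, Nat.testBit_lt_two_pow hk.2] at this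
    | negSucc n =>
      have := Nat.eq_of_testBit_eq (x := m) (y := n) (fun k => by
        have := h k; simpa [Int.testBit] using this)
      simp [this]

theorem lorComm (a b : Int) : a.lor b = b.lor a :=
  intTestBitExt _ _ fun k => by simp [Int.testBit_lor, Bool.or_comm]
theorem lorAssoc (a b c : Int) : (a.lor b).lor c = a.lor (b.lor c) :=
  intTestBitExt _ _ fun k => by simp [Int.testBit_lor, Bool.or_assoc]
theorem zeroTestBit (k : ℕ) : (0:Int).testBit k = false := by
  simp [Int.testBit]
theorem zeroLor (a : Int) : (0:Int).lor a = a :=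
  intTestBitExt _ _ fun k => by simp [Int.testBit_lor, zeroTestBit]
theorem mul2Lor (a b : Int) : (a.lor b) * 2 = (a*2).lor (b*2) := by
  have h := Int.lor_bit false a false b
  simpa [Int.bit_val, mul_comm] using h.symm

-- common specification: the list of byte values, one per complete group of 8 bits
def byteSpec : List Int → List Int
  | x0 :: x1 :: x2 :: x3 :: x4 :: x5 :: x6 :: x7 :: rest =>
      (((((((((0 : Int).lor (x0 * 1)).lor (x1 * 2)).lor (x2 * 4)).lor (x3 * 8)).lor
        (x4 * 16)).lor (x5 * 32)).lor (x6 * 64)).lor (x7 * 128)) :: byteSpec rest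
  | _ => []

theorem loopA_shift : ∀ (xs : List Int) (i : Nat) (tmp : Int) (acc : List Int),
    bit2hexLoopA xs (i + 8) tmp acc = bit2hexLoopA xs i tmp acc := by
  intro xs
  induction xs with
  | nil => intro i tmp acc; simp [bit2hexLoopA]
  | cons x rest ih =>
    intro i tmp acc
    simp only [bit2hexLoopA, Nat.add_mod_right]
    rw [show i + 8 + 1 = (i + 1) + 8 from by omega, ih, ih]

theorem loopA_eq (n : ℕ) : ∀ xs : List Int, xs.length ≤ n → ∀ acc : List Int,
    bit2hexLoopA xs 0 0 acc = acc.reverse ++ byteSpec xs := by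
  induction n with
  | zero =>
    intro xs h acc
    have : xs = [] := List.eq_nil_of_length_eq_zero (Nat.le_zero.mp h)
    subst this; simp [bit2hexLoopA, byteSpec]
  | succ n ih =>
    intro xs h acc
    rcases xs with _|⟨x0,_|⟨x1,_|⟨x2,_|⟨x3,_|⟨x4,_|⟨x5,_|⟨x6,_|⟨x7,rest⟩⟩⟩⟩⟩⟩⟩⟩ <;>
      try simp [bit2hexLoopA, byteSpec]
    rw [show (8:Nat) = 0 + 8 from rfl, loopA_shift,
      ih rest (by simp at h; omega)]
    simp

-- B's Horner build of one 8-bit chunk equals A's per-position packing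
theorem horner_chunk (x0 x1 x2 x3 x4 x5 x6 x7 : Int) :
    hornerByte [x0,x1,x2,x3,x4,x5,x6,x7]
      = (((((((((0 : Int).lor (x0 * 1)).lor (x1 * 2)).lor (x2 * 4)).lor (x3 * 8)).lor
        (x4 * 16)).lor (x5 * 32)).lor (x6 * 64)).lor (x7 * 128)) := by
  simp only [hornerByte, List.reverse_cons, List.reverse_nil, List.nil_append,
    List.cons_append, List.foldl_cons, List.foldl_nil, mul2Lor, zeroLor]
  ring_nf
  simp only [lorComm, lorAssoc, zeroLor]

-- proof-side chunked form of B's loop, and its correctness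
def loopBChunks (bits : List Int) : List String :=
  if _h : 8 ≤ bits.length then
    pyHex (hornerByte (bits.take 8)) :: loopBChunks (bits.drop 8)
  else []
termination_by bits.length
decreasing_by simp; omega

theorem loopBChunks_eq (n : ℕ) : ∀ xs : List Int, xs.length ≤ n →
    loopBChunks xs = (byteSpec xs).map pyHex := by
  induction n with
  | zero =>
    intro xs h
    have : xs = [] := List.eq_nil_of_length_eq_zero (Nat.le_zero.mp h)
    subst this; simp [loopBChunks, byteSpec]
  | succ n ih =>
    intro xs h
    rcases xs with _|⟨x0,_|⟨x1,_|⟨x2,_|⟨x3,_|⟨x4,_|⟨x5,_|⟨x6,_|⟨x7,rest⟩⟩⟩⟩⟩⟩⟩⟩ <;>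
      rw [loopBChunks] <;> try simp [byteSpec]
    exact ⟨by rw [horner_chunk]; norm_num, ih rest (by simp at h; omega)⟩

theorem loopB_bridge (n : ℕ) : ∀ (xs : List Int) (p : Nat), xs.length - p ≤ n →
    bit2hexLoopB xs p = loopBChunks (xs.drop p) := by
  induction n with
  | zero =>
    intro xs p h
    rw [bit2hexLoopB, loopBChunks]
    rw [dif_neg (by omega), dif_neg (by simp; omega)]
  | succ n ih =>
    intro xs p h
    rw [bit2hexLoopB, loopBChunks]
    by_cases hp : p + 8 ≤ xs.length
    · rw [dif_pos hp, dif_pos (by simp; omega)]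
      rw [PySem.List.slice_natCast, show p + 8 - p = 8 from by omega,
        ih xs (p + 8) (by omega), ← List.drop_drop]
    · rw [dif_neg hp, dif_neg (by simp; omega)]

-- ===== VERDICT (by name: the statement is the Claim_ definition above) =====
theorem bit2hex_spec : Claim_equal_bit2hex := by
  intro xs _
  unfold Spec_bit2hex bit2hex bit2hex_alt
  rw [loopA_eq xs.length xs le_rfl [], loopB_bridge xs.length xs 0 (by omega),
    List.drop_zero, loopBChunks_eq xs.length xs le_rfl]
  simp
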